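-- pv_equiv track=rewrite | github.com/wongzc/NUS_IT5001_PE_answer | solution/IT5001 2020_21 SEM1 PE.py | maxAnyCombGoodMatch
-- ===== SOURCE A (Python) =====
-- def maxAnyCombGoodMatch(fpp,mpp):
--     ans=0
--     f={}
--     for fp in fpp:
--         if fp in f:
--             f[fp]+=1
--         else:
--             f[fp]=1
--
--     m={}
--     for mp in mpp:
--         if mp in m:
--             m[mp]+=1
--         else:
--             m[mp]=1
--     for k,v in m.items():
--         ans+=min(v,f.get(k,0))
--     return ans
-- ===== SOURCE B (Python) =====
-- def maxAnyCombGoodMatch(fpp, mpp):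
--     f = {}
--     for x in fpp:
--         f[x] = f.get(x, 0) + 1
--     ans = 0
--     for x in mpp:
--         if f.get(x, 0) > 0:
--             ans += 1
--             f[x] -= 1
--     return ans
-- ===== Notes on version B (the rewrite author's own statement) =====
-- stated objective: alternative
-- what changed: A builds two frequency dicts and then sums min(v, f.get(k,0)) over the second dict's items; B keeps only one count map of fpp and makes a single consuming streaming pass over mpp, decrementing a budget and counting matches, with no second dict and no min loop.
import Mathlib
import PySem

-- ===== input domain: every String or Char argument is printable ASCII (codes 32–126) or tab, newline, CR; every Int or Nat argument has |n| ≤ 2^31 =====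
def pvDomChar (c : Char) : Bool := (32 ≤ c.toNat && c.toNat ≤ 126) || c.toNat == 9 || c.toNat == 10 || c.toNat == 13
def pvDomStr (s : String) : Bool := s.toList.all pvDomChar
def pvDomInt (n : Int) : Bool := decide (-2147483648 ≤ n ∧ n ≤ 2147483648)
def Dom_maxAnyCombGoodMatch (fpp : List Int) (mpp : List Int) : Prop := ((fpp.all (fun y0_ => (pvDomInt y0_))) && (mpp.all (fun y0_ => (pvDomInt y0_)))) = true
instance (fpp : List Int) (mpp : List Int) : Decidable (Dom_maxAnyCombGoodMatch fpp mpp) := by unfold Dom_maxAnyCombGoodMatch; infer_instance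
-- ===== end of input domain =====

-- B replaces A's two-dict build + min loop by one count map of fpp and a single
-- consuming streaming pass over mpp (alternative decomposition, same cost).

-- ===== PORT A =====
def maxAnyCombGoodMatch (fpp : List Int) (mpp : List Int) : Int :=
  let f := fpp.foldl (fun d fp => if d.contains fp then d.insert fp (d.getD fp 0 + 1) else d.insert fp 1) PySem.Dict.empty
  let m := mpp.foldl (fun d mp => if d.contains mp then d.insert mp (d.getD mp 0 + 1) else d.insert mp 1) PySem.Dict.empty
  m.items.foldl (fun ans kv => ans + min kv.2 (f.getD kv.1 0)) 0

-- ===== PORT B =====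
def maxAnyCombGoodMatch_alt (fpp : List Int) (mpp : List Int) : Int :=
  let f := fpp.foldl (fun d x => d.insert x (d.getD x 0 + 1)) (PySem.Dict.empty : PySem.Dict Int Int)
  let r := mpp.foldl (fun s x => if s.1.getD x 0 > 0 then (s.1.modify x 0 (· - 1), s.2 + 1) else s) (f, (0 : Int))
  r.2

-- ===== PRECONDITION & SPEC =====
def Spec_maxAnyCombGoodMatch (fpp : List Int) (mpp : List Int) (out : Int) : Prop := out = maxAnyCombGoodMatch_alt fpp mpp
instance (fpp : List Int) (mpp : List Int) (out : Int) : Decidable (Spec_maxAnyCombGoodMatch fpp mpp out) := by unfold Spec_maxAnyCombGoodMatch; infer_instance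

-- ===== CLAIM (what is proved, stated in full; the proofs are below) =====
def Claim_equal_maxAnyCombGoodMatch : Prop := ∀ (fpp : List Int) (mpp : List Int), Dom_maxAnyCombGoodMatch fpp mpp → Spec_maxAnyCombGoodMatch fpp mpp (maxAnyCombGoodMatch fpp mpp)

-- ===== LEMMAS AND PROOFS =====

-- A's if-based dict-count loop is the counter fold.
lemma countLoop_eq_counter (l : List Int) :
    l.foldl (fun d x => if d.contains x then d.insert x (d.getD x 0 + 1) else d.insert x 1) PySem.Dict.empty
      = PySem.Dict.counter l := by
  rw [← PySem.Dict.foldl_insert_getD_add_one_eq_counter]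
  congr 1
  funext d x
  by_cases h : d.contains x
  · simp [h]
  · rw [if_neg h, PySem.Dict.getD_of_not_contains d 0 (by simpa using h)]
    norm_num

-- B's streaming loop sums min(count in l, positive part of the remaining budget) over any nodup key list covering l.
lemma bloop_eq_sum (l K : List Int) (hK : K.Nodup) (hsub : ∀ y ∈ l, y ∈ K)
    (d : PySem.Dict Int Int) (ans : Int) :
    (l.foldl (fun s x => if s.1.getD x 0 > 0 then (s.1.modify x 0 (· - 1), s.2 + 1) else s) (d, ans)).2
      = ans + (K.map (fun k => min ((l.count k : Int)) (max (d.getD k 0) 0))).sum := by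
  induction l generalizing d ans with
  | nil =>
      simp only [List.foldl_nil, List.count_nil, Nat.cast_zero]
      have : (K.map (fun k => min ((0 : Int)) (max (d.getD k 0) 0))).sum = 0 := by
        apply List.sum_eq_zero
        intro z hz
        simp only [List.mem_map] at hz
        obtain ⟨k, _, rfl⟩ := hz
        omega
      omega
  | cons x t ih =>
      have hx : x ∈ K := hsub x (by simp)
      have hperm : K.Perm (x :: K.erase x) := List.perm_cons_erase hx
      have hne : ∀ k ∈ K.erase x, k ≠ x := by
        intro k hk
        rintro rfl
        exact (hK.not_mem_erase) hk
      have hsum : ∀ (g : Int → Int), (K.map g).sum = g x + ((K.erase x).map g).sum := by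
        intro g
        have := (hperm.map g).sum_eq
        simpa using this
      simp only [List.foldl_cons]
      by_cases h : d.getD x 0 > 0
      · rw [if_pos h]
        rw [ih (fun y hy => hsub y (by simp [hy])) (d.modify x 0 (· - 1)) (ans + 1)]
        rw [hsum, hsum]
        have htail : ((K.erase x).map (fun k => min ((t.count k : Int)) (max ((d.modify x 0 (· - 1)).getD k 0) 0))).sum
            = ((K.erase x).map (fun k => min (((x :: t).count k : Int)) (max (d.getD k 0) 0))).sum := by
          apply congrArg
          apply List.map_congr_left
          intro k hk
          have hkx := hne k hk
          rw [PySem.Dict.getD_modify_of_ne d 0 _ hkx, List.count_cons_of_ne (Ne.symm hkx)]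
        rw [htail]
        have hhead : (1 : Int) + min ((t.count x : Int)) (max ((d.modify x 0 (· - 1)).getD x 0) 0)
            = min (((x :: t).count x : Int)) (max (d.getD x 0) 0) := by
          rw [PySem.Dict.getD_modify_self, List.count_cons_self]
          push_cast
          omega
        omega
      · rw [if_neg h]
        rw [ih (fun y hy => hsub y (by simp [hy])) d ans]
        rw [hsum, hsum]
        have htail : ((K.erase x).map (fun k => min ((t.count k : Int)) (max (d.getD k 0) 0))).sum
            = ((K.erase x).map (fun k => min (((x :: t).count k : Int)) (max (d.getD k 0) 0))).sum := by
          apply congrArg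
          apply List.map_congr_left
          intro k hk
          rw [List.count_cons_of_ne (Ne.symm (hne k hk))]
        have hhead : min ((t.count x : Int)) (max (d.getD x 0) 0)
            = min (((x :: t).count x : Int)) (max (d.getD x 0) 0) := by
          rw [List.count_cons_self]
          push_cast
          omega
        omega

-- ===== VERDICT (by name: the statement is the Claim_ definition above) =====
theorem maxAnyCombGoodMatch_spec : Claim_equal_maxAnyCombGoodMatch := by
  intro fpp mpp _
  unfold Spec_maxAnyCombGoodMatch maxAnyCombGoodMatch maxAnyCombGoodMatch_alt
  simp only [countLoop_eq_counter]
  have hf : List.foldl (fun d (x : Int) => d.insert x (d.getD x 0 + 1)) PySem.Dict.empty fpp = PySem.Dict.counter fpp :=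
    PySem.Dict.foldl_insert_getD_add_one_eq_counter fpp
  rw [hf, PySem.Dict.items_counter,
      PySem.List.foldl_add,
      bloop_eq_sum mpp (PySem.Set.ofList mpp) (PySem.Set.nodup_ofList mpp)
        (fun y hy => (PySem.Set.mem_ofList mpp y).2 hy)]
  simp only [List.map_map, PySem.Dict.getD_counter]
  congr 1
  apply congrArg List.sum
  apply List.map_congr_left
  intro k _
  simp only [Function.comp_apply]
  omega
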